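-- pv_equiv track=rewrite | github.com/thieu1995/AI_training | nguyen_anh_tu/CRO/problems.py | taskFitness
-- ===== SOURCE A (Python) =====
-- def taskFitness(solution):
-- 	res = 0
-- 	for i in range(len(solution)):
-- 		if i%2 == 0:
-- 			res += solution[i]**2
-- 		else:
-- 			res += solution[i]**3
-- 	return res
-- ===== SOURCE B (Python) =====
-- def taskFitness(solution):
--     it = iter(solution)
--     total = 0
--     for x in it:
--         total += x * x
--         y = next(it, None)
--         if y is None:
--             break
--         total += y ** 3
--     return total
-- ===== Notes on version B (the rewrite author's own statement) =====
-- stated objective: alternative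
-- what changed: Replaces the index loop with an if/else on i%2 by a single iterator-pairing pass that consumes two elements per step, squaring the first and cubing the second, so no index or parity test exists.
import Mathlib
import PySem

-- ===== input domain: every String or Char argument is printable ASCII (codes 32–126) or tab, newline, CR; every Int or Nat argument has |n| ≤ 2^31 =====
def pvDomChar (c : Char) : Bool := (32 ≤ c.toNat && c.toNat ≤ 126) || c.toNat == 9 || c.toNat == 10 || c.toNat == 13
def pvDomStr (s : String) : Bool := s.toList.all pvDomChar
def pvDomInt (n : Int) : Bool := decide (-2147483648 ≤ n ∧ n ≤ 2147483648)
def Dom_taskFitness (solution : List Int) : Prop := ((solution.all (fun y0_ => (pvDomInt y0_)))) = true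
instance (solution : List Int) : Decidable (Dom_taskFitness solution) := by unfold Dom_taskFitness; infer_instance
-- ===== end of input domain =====

-- B replaces A's index loop (if/else on i%2) by an iterator-pairing pass consuming two
-- elements per step (square the first, cube the second); alternative decomposition, same cost.

-- ===== PORT A =====
-- for i in range(len(solution)): if i%2==0: res += solution[i]**2 else: res += solution[i]**3
def taskFitness (solution : List Int) : Int :=
  (PySem.List.pyRange 0 (solution.length : Int) 1).foldl
    (fun res i =>
      if PySem.Int.mod i 2 == 0 then res + (PySem.List.pyGetD solution i 0) ^ 2
      else res + (PySem.List.pyGetD solution i 0) ^ 3)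
    0

-- ===== PORT B =====
-- the 'for x in it' loop of Source B: each iteration takes x, adds x*x, then tries to take y
-- (next(it, None)); None (= rest exhausted) breaks, otherwise adds y**3 and continues.
def taskFitnessAltGo (rest : List Int) (total : Int) : Int :=
  match rest with
  | [] => total
  | x :: rest =>
    let total := total + x * x
    match rest with
    | [] => total
    | y :: rest' => taskFitnessAltGo rest' (total + y ^ 3)

def taskFitness_alt (solution : List Int) : Int := taskFitnessAltGo solution 0

-- ===== PRECONDITION & SPEC =====
def Spec_taskFitness (solution : List Int) (out : Int) : Prop := out = taskFitness_alt solution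
instance (solution : List Int) (out : Int) : Decidable (Spec_taskFitness solution out) := by unfold Spec_taskFitness; infer_instance

-- ===== CLAIM (what is proved, stated in full; the proofs are below) =====
def Claim_equal_taskFitness : Prop := ∀ (solution : List Int), Dom_taskFitness solution → Spec_taskFitness solution (taskFitness solution)

-- ===== LEMMAS AND PROOFS =====

-- the loop body of A, over (index, value) pairs
def pvBodyA (res : Int) (p : Int × Int) : Int :=
  if PySem.Int.mod p.1 2 == 0 then res + p.2 ^ 2 else res + p.2 ^ 3

lemma pvMain : ∀ (xs : List Int) (s total : Int), s % 2 = 0 →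
    (PySem.List.enumerate xs s).foldl pvBodyA total = taskFitnessAltGo xs total
  | [], _, _, _ => by simp [PySem.List.enumerate_nil, taskFitnessAltGo]
  | [x], s, total, hs => by
    simp [PySem.List.enumerate_cons, PySem.List.enumerate_nil, taskFitnessAltGo, pvBodyA,
      PySem.Int.mod_eq_emod_of_pos (a := s) (by norm_num : (0:Int) < 2), hs, sq]
  | x :: y :: rest', s, total, hs => by
    have h1 : (s + 1) % 2 = 1 := by omega
    have h2 : (s + 1 + 1) % 2 = 0 := by omega
    simp only [PySem.List.enumerate_cons, List.foldl_cons]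
    rw [pvMain rest' (s + 1 + 1) _ h2]
    simp [taskFitnessAltGo, pvBodyA,
      PySem.Int.mod_eq_emod_of_pos (a := s) (by norm_num : (0:Int) < 2),
      PySem.Int.mod_eq_emod_of_pos (a := s + 1) (by norm_num : (0:Int) < 2), hs, h1, sq]

lemma pvA_eq_fold_enum (xs : List Int) :
    taskFitness xs = (PySem.List.enumerate xs 0).foldl pvBodyA 0 := by
  unfold taskFitness
  have hr : PySem.List.pyRange 0 (xs.length : Int) 1
      = (PySem.List.enumerate xs 0).map (·.1) := by
    rw [PySem.List.map_fst_enumerate]; norm_num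
  rw [hr, List.foldl_map]
  apply PySem.List.foldl_congr_mem
  intro acc p hp
  rcases (PySem.List.mem_enumerate_iff _ _ _).1 hp with ⟨k, hk, rfl⟩
  simp [pvBodyA, PySem.List.pyGetD_natCast, hk]

-- ===== VERDICT (by name: the statement is the Claim_ definition above) =====
theorem taskFitness_spec : Claim_equal_taskFitness := by
  intro xs _
  unfold Spec_taskFitness taskFitness_alt
  rw [pvA_eq_fold_enum, pvMain xs 0 0 (by norm_num)]
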